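-- pv_equiv track=rewrite | github.com/GregoryREvans/tupos | tupos/materials/pitch.py | vector_to_indices
-- ===== SOURCE A (Python) =====
-- def vector_to_indices(vector):
--     cell_indices = []
--     cell_counter = 0
--     for integer in vector:
--         cell_counter += abs(integer)
--         if 0 < integer:
--             cell_indices.append(cell_counter)
--         else:
--             continue
--     return cell_indices
-- ===== SOURCE B (Python) =====
-- def vector_to_indices(vector):
--     total = sum(abs(v) for v in vector)
--     out = []
--     for v in reversed(vector):
--         if v > 0:
--             out.append(total)
--         total -= abs(v)
--     out.reverse()
--     return out
-- ===== Notes on version B (the rewrite author's own statement) =====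
-- stated objective: alternative
-- what changed: Instead of a forward scan with a running prefix-sum accumulator, B precomputes the total sum of absolute values in one pass, then traverses the list in reverse subtracting each |v|, so each positive entry's prefix sum is obtained as the remaining total; the output is built back-to-front and reversed at the end.
import Mathlib
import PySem

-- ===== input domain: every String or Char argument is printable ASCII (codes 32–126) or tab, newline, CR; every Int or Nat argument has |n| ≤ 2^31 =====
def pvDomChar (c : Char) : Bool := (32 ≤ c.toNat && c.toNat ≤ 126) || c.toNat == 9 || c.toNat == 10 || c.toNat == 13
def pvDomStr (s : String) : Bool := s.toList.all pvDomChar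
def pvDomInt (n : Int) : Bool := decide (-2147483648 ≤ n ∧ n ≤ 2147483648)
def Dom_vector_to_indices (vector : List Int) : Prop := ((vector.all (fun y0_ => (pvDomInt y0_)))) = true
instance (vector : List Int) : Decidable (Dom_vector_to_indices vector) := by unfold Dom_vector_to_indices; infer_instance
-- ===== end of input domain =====

-- B replaces A's forward running-sum loop by: total = sum of |v|, then a reverse traversal subtracting |v| and emitting totals back-to-front; alternative decomposition, same O(n) cost.


-- ===== PORT A =====
def vector_to_indices (vector : List Int) : List Int :=
  (vector.foldl
    (fun (st : List Int × Int) integer =>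
      let cell_counter := st.2 + |integer|
      if 0 < integer then (st.1 ++ [cell_counter], cell_counter)
      else (st.1, cell_counter))
    ([], 0)).1

-- ===== PORT B =====
def vector_to_indices_alt (vector : List Int) : List Int :=
  let total := (vector.map (fun v => |v|)).sum
  let st := vector.reverse.foldl
    (fun (st : List Int × Int) v =>
      let out := if 0 < v then st.1 ++ [st.2] else st.1
      (out, st.2 - |v|))
    ([], total)
  st.1.reverse

-- ===== PRECONDITION & SPEC =====
def Spec_vector_to_indices (vector : List Int) (out : List Int) : Prop := out = vector_to_indices_alt vector
instance (vector : List Int) (out : List Int) : Decidable (Spec_vector_to_indices vector out) := by unfold Spec_vector_to_indices; infer_instance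

-- ===== CLAIM (what is proved, stated in full; the proofs are below) =====
def Claim_equal_vector_to_indices : Prop := ∀ (vector : List Int), Dom_vector_to_indices vector → Spec_vector_to_indices vector (vector_to_indices vector)

-- ===== LEMMAS AND PROOFS =====

-- Common characterization: prefix sums of |·| starting from c, kept at positive entries.
def vtiSpec (c : Int) : List Int → List Int
  | [] => []
  | x :: xs => if 0 < x then (c + |x|) :: vtiSpec (c + |x|) xs else vtiSpec (c + |x|) xs

lemma vti_A_loop (vector : List Int) (acc : List Int) (c : Int) :
    (vector.foldl
      (fun (st : List Int × Int) integer =>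
        let cell_counter := st.2 + |integer|
        if 0 < integer then (st.1 ++ [cell_counter], cell_counter)
        else (st.1, cell_counter))
      (acc, c)).1 = acc ++ vtiSpec c vector := by
  induction vector generalizing acc c with
  | nil => simp [vtiSpec]
  | cons x xs ih =>
    by_cases hx : 0 < x <;> simp [vtiSpec, hx, ih, List.append_assoc]

lemma vti_B_loop (vector : List Int) (acc : List Int) (c : Int) :
    vector.reverse.foldl
      (fun (st : List Int × Int) v =>
        let out := if 0 < v then st.1 ++ [st.2] else st.1
        (out, st.2 - |v|))
      (acc, c + (vector.map (fun v => |v|)).sum)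
    = (acc ++ (vtiSpec c vector).reverse, c) := by
  induction vector generalizing acc c with
  | nil => simp [vtiSpec]
  | cons x xs ih =>
    have h : c + ((x :: xs).map (fun v => |v|)).sum
        = (c + |x|) + (xs.map (fun v => |v|)).sum := by
      simp; ring
    rw [List.reverse_cons, List.foldl_append, h, ih]
    by_cases hx : 0 < x <;> simp [vtiSpec, hx, List.append_assoc]

-- ===== VERDICT (by name: the statement is the Claim_ definition above) =====
theorem vector_to_indices_spec : Claim_equal_vector_to_indices := by
  intro vector _
  unfold Spec_vector_to_indices vector_to_indices vector_to_indices_alt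
  have hB := vti_B_loop vector [] 0
  rw [zero_add] at hB
  simp only [hB, vti_A_loop]
  simp
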